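-- pv_equiv track=rewrite | github.com/anand0906/DataStructures-Algorithms | Prefix Sum/Problems/Find Longest Awesome Substring - Palindrome With Swaps.py | optimized2
-- ===== SOURCE A (Python) =====
-- def optimized2(n,word):
--     prefix=[None]*1024
--     prefix[0]=-1
--     currentXor=0
--     maxi=0
--     for i in range(n):
--         mask=1<<int(word[i])
--         currentXor^=mask
--         if(prefix[currentXor] is not None):
--             length=i-prefix[currentXor]
--             maxi=max(maxi,length)
--         for j in range(10):
--             mask=1<<int(j)
--             oddCnt=currentXor^mask
--             if(prefix[oddCnt] is not None):
--                 length=i-prefix[oddCnt]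
--                 maxi=max(maxi,length)
--         if(prefix[currentXor] is None):
--             prefix[currentXor]=i
--     return maxi
-- ===== SOURCE B (Python) =====
-- def optimized2(n, word):
--     # brute force over prefix parity masks: masks[q] ^ masks[p] has at most one
--     # set bit iff word[p:q] can be permuted into a palindrome
--     masks = [0]
--     m = 0
--     for i in range(n):
--         m ^= 1 << int(word[i])
--         masks.append(m)
--     best = 0
--     for q in range(1, len(masks)):
--         for p in range(q):
--             d = masks[p] ^ masks[q]
--             if d & (d - 1) == 0:
--                 best = max(best, q - p)
--     return best
-- ===== Notes on version B (the rewrite author's own statement) =====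
-- stated objective: alternative
-- what changed: Replaces the 1024-entry first-occurrence prefix table (and its 11 candidate-mask probes per position) by an explicit prefix-mask list and a brute-force double scan over all prefix pairs, testing the xor-difference for at-most-one set bit directly.
import Mathlib
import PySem

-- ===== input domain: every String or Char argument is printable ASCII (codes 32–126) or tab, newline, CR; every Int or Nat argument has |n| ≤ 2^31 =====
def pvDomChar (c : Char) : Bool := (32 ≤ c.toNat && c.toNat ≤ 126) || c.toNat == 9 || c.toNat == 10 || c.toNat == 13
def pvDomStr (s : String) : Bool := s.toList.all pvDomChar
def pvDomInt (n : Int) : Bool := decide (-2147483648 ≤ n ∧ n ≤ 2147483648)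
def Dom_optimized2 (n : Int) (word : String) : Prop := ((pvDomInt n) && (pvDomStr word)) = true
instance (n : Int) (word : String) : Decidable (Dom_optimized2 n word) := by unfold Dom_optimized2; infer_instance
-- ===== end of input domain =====

-- B replaces A's 1024-entry first-occurrence prefix table by a brute-force double
-- scan over an explicit prefix-mask list (alternative algorithm, not faster).


-- ===== PORT A =====
-- int(word[i]) : exact for the digit characters '0'..'9' that Pre_ admits
-- (on any other character Python raises ValueError and the input is outside Pre_).
def pvDigit (word : String) (i : Nat) : Nat :=
  ((PySem.Str.pyGet? word (i : Int)).getD '0').toNat - 48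

-- the Python list 'prefix' of 1024 None-initialised cells, modelled as a total map
-- (every index A ever uses is a 10-bit xor mask, i.e. < 1024 under Pre_)
def pvAGo (word : String) : Nat → Nat → (Nat → Option Int) → Nat → Int → Int
  | 0, _, _, _, maxi => maxi
  | fuel+1, i, prefixT, currentXor, maxi =>
    let mask := 1 <<< pvDigit word i
    let cx := currentXor ^^^ mask
    let maxi1 : Int :=
      match prefixT cx with
      | some p => max maxi ((i : Int) - p)
      | none => maxi
    let maxi2 : Int :=
      (List.range 10).foldl (fun m j =>
        match prefixT (cx ^^^ (1 <<< j)) with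
        | some p => max m ((i : Int) - p)
        | none => m) maxi1
    let prefixT' : Nat → Option Int :=
      match prefixT cx with
      | none => fun x => if x = cx then some (i : Int) else prefixT x
      | some _ => prefixT
    pvAGo word fuel (i+1) prefixT' cx maxi2

def optimized2 (n : Int) (word : String) : Int :=
  pvAGo word n.toNat 0 (fun m => if m = 0 then some (-1) else none) 0 0

-- ===== PORT B =====
-- the loop 'for i in range(n): m ^= 1 << int(word[i]); masks.append(m)'
def pvBMasks (word : String) : Nat → Nat → Nat → List Nat
  | 0, _, _ => []
  | fuel+1, i, m =>
    let m' := m ^^^ (1 <<< pvDigit word i)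
    m' :: pvBMasks word fuel (i+1) m'

-- d & (d - 1) == 0
def pvGood (d : Nat) : Bool := d &&& (d - 1) == 0

def optimized2_alt (n : Int) (word : String) : Int :=
  let masks : List Nat := 0 :: pvBMasks word n.toNat 0 0
  (List.range' 1 (masks.length - 1)).foldl (fun best q =>
    (List.range q).foldl (fun best p =>
      if pvGood (masks.getD p 0 ^^^ masks.getD q 0) then max best ((q : Int) - (p : Int))
      else best) best) 0

-- ===== PRECONDITION & SPEC =====
-- Pre_ is exactly where Python A returns: n ≤ len(word) (else word[i] raises
-- IndexError) and the first n characters are '0'..'9' (else int(...) raises ValueError).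
def Pre_optimized2 (n : Int) (word : String) : Prop :=
  n ≤ (word.toList.length : Int) ∧
  (word.toList.take n.toNat).all (fun c => 48 ≤ c.toNat && c.toNat ≤ 57) = true
instance (n : Int) (word : String) : Decidable (Pre_optimized2 n word) := by
  unfold Pre_optimized2; infer_instance

def pvWitness_optimized2 : Int × String := (5, "12321")

def Spec_optimized2 (n : Int) (word : String) (out : Int) : Prop := out = optimized2_alt n word
instance (n : Int) (word : String) (out : Int) : Decidable (Spec_optimized2 n word out) := by unfold Spec_optimized2; infer_instance

-- ===== CLAIM (what is proved, stated in full; the proofs are below) =====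
def Claim_equal_optimized2 : Prop := ∀ (n : Int) (word : String), Dom_optimized2 n word → Pre_optimized2 n word → Spec_optimized2 n word (optimized2 n word)

-- ===== LEMMAS AND PROOFS =====

-- prefix xor mask of the first t digits
def pvM (word : String) : Nat → Nat
  | 0 => 0
  | k+1 => pvM word k ^^^ (1 <<< pvDigit word k)

-- the value both programs compute up to prefix index t
def pvBest (word : String) (t : Nat) : Int :=
  (List.range' 1 t).foldl (fun best q =>
    (List.range q).foldl (fun best p =>
      if pvGood (pvM word p ^^^ pvM word q) then max best ((q : Int) - (p : Int))
      else best) best) 0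

-- generic "max over the selected elements" fold
def pvMFold {α : Type} (c : α → Bool) (v : α → Int) (l : List α) (b : Int) : Int :=
  l.foldl (fun m x => if c x then max m (v x) else m) b

theorem pvMFold_init {α : Type} (c : α → Bool) (v : α → Int) (l : List α) (b : Int) :
    b ≤ pvMFold c v l b := by
  induction l generalizing b with
  | nil => simp [pvMFold]
  | cons x xs ih =>
    simp only [pvMFold, List.foldl_cons]
    by_cases h : c x = true <;> simp [h]
    · exact le_trans (le_max_left _ _) (ih _)
    · exact ih _

theorem pvMFold_ge {α : Type} (c : α → Bool) (v : α → Int) (l : List α) (b : Int)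
    {x : α} (hx : x ∈ l) (hc : c x = true) : v x ≤ pvMFold c v l b := by
  induction l generalizing b with
  | nil => cases hx
  | cons y ys ih =>
    rcases List.mem_cons.1 hx with rfl | hmem
    · simp only [pvMFold, List.foldl_cons, hc, if_pos]
      exact le_trans (le_max_right _ _) (pvMFold_init _ _ _ _)
    · simp only [pvMFold, List.foldl_cons]
      exact ih _ hmem

theorem pvMFold_le {α : Type} (c : α → Bool) (v : α → Int) (l : List α) (b K : Int)
    (hb : b ≤ K) (h : ∀ x ∈ l, c x = true → v x ≤ K) : pvMFold c v l b ≤ K := by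
  induction l generalizing b with
  | nil => simpa [pvMFold]
  | cons x xs ih =>
    simp only [pvMFold, List.foldl_cons]
    by_cases hc : c x = true <;> simp [hc]
    · exact ih _ (max_le hb (h x (List.mem_cons_self) hc))
        (fun y hy => h y (List.mem_cons_of_mem _ hy))
    · exact ih _ hb (fun y hy => h y (List.mem_cons_of_mem _ hy))

-- invariant on A's table after processing t characters
def pvInv (word : String) (t : Nat) (f : Nat → Option Int) : Prop :=
  (∀ m v, f m = some v →
      ∃ p, p ≤ t ∧ pvM word p = m ∧ v = (p : Int) - 1 ∧ ∀ p' < p, pvM word p' ≠ m) ∧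
  (∀ m, f m = none → ∀ p ≤ t, pvM word p ≠ m)

theorem pvInv_init (word : String) :
    pvInv word 0 (fun m => if m = 0 then some (-1) else none) := by
  constructor
  · intro m v h
    by_cases hm : m = 0
    · subst hm
      refine ⟨0, le_refl _, rfl, ?_, by omega⟩
      simp at h; omega
    · simp [hm] at h
  · intro m h p hp
    interval_cases p
    by_cases hm : m = 0 <;> simp [hm] at h ⊢
    exact fun hc => hm hc.symm

theorem pvInv_step (word : String) (i : Nat) (f : Nat → Option Int) (h : pvInv word i f) :
    pvInv word (i+1)
      (match f (pvM word (i+1)) with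
       | none => fun x => if x = pvM word (i+1) then some (i : Int) else f x
       | some _ => f) := by
  obtain ⟨h1, h2⟩ := h
  cases hfc : f (pvM word (i+1)) with
  | none =>
    show pvInv word (i+1) (fun x => if x = pvM word (i+1) then some (i : Int) else f x)
    constructor
    · intro m v hv
      by_cases hm : m = pvM word (i+1)
      · subst hm
        have hvi : (i : Int) = v := by simpa using hv
        refine ⟨i+1, le_refl _, rfl, ?_, ?_⟩
        · push_cast
          omega
        · intro p' hp'
          exact h2 _ hfc p' (by omega)
      · simp only [if_neg hm] at hv
        obtain ⟨p, hp, hpm, hval, hmin⟩ := h1 m v hv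
        exact ⟨p, by omega, hpm, hval, hmin⟩
    · intro m hm p hp
      by_cases hmc : m = pvM word (i+1)
      · simp [hmc] at hm
      · simp only [if_neg hmc] at hm
        by_cases hpi : p ≤ i
        · exact h2 m hm p hpi
        · have hpe : p = i+1 := by omega
          subst hpe
          exact fun hc => hmc hc.symm
  | some w =>
    show pvInv word (i+1) f
    constructor
    · intro m v hv
      obtain ⟨p, hp, hpm, hval, hmin⟩ := h1 m v hv
      exact ⟨p, by omega, hpm, hval, hmin⟩
    · intro m hm p hp
      by_cases hpi : p ≤ i
      · exact h2 m hm p hpi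
      · have hpe : p = i+1 := by omega
        subst hpe
        intro hc
        rw [hc, hm] at hfc
        cases hfc

theorem pvGood_two_pow : ∀ j < 10, pvGood (1 <<< j) = true := by decide

set_option maxRecDepth 4096 in
theorem pvGood_small : ∀ d < 1024, pvGood d = true → d = 0 ∨ ∃ j < 10, d = 1 <<< j := by decide

theorem pvM_lt (word : String) (t : Nat) (hd : ∀ k < t, pvDigit word k < 10) :
    pvM word t < 1024 := by
  induction t with
  | zero => simp [pvM]
  | succ k ih =>
    have h1 : pvM word k < 2 ^ 10 := ih (fun j hj => hd j (by omega))
    have h2 : 1 <<< pvDigit word k < 2 ^ 10 := by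
      rw [Nat.one_shiftLeft]
      exact Nat.pow_lt_pow_right (by norm_num) (hd k (by omega))
    exact Nat.xor_lt_two_pow h1 h2

-- A's candidate masks at step i (q = i+1)
def pvCand (word : String) (i : Nat) : List Nat :=
  pvM word (i+1) :: (List.range 10).map (fun j => pvM word (i+1) ^^^ (1 <<< j))

theorem foldl_match_mfold (f : Nat → Option Int) (e : Int) (h : Nat → Nat) :
    ∀ (l : List Nat) (b : Int),
    l.foldl (fun m j =>
      match f (h j) with
      | some p => max m (e - p)
      | none => m) b
    = pvMFold (fun m => (f m).isSome) (fun m => e - (f m).getD 0) (l.map h) b := by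
  intro l
  induction l with
  | nil => intro b; rfl
  | cons x xs ih =>
    intro b
    simp only [List.foldl_cons, List.map_cons, pvMFold, List.foldl_cons] at *
    cases hfx : f (h x) <;> simp only [Option.isSome_some, Option.isSome_none,
      Option.getD_some, if_true, if_false, Bool.false_eq_true] <;> exact ih _


theorem step_value (word : String) (i : Nat) (f : Nat → Option Int) (maxi : Int)
    (hInv : pvInv word i f) (hM : ∀ p ≤ i+1, pvM word p < 1024) :
    pvMFold (fun m => (f m).isSome) (fun m => (i : Int) - (f m).getD 0) (pvCand word i) maxi
    = pvMFold (fun p => pvGood (pvM word p ^^^ pvM word (i+1)))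
        (fun p => (((i:Int) + 1)) - (p : Int)) (List.range (i+1)) maxi := by
  apply le_antisymm
  · apply pvMFold_le
    · exact pvMFold_init _ _ _ _
    · intro m hm hc
      obtain ⟨v, hv⟩ := Option.isSome_iff_exists.1 hc
      obtain ⟨p, hp, hpm, hval, hmin⟩ := hInv.1 m v hv
      have hgood : pvGood (pvM word p ^^^ pvM word (i+1)) = true := by
        rcases List.mem_cons.1 hm with heq | hmem
        · rw [hpm, heq, Nat.xor_self]; decide
        · obtain ⟨j, hj, hje⟩ := List.mem_map.1 hmem
          have hj10 := List.mem_range.1 hj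
          rw [hpm, ← hje, Nat.xor_comm (pvM word (i+1)) (1 <<< j), Nat.xor_assoc,
            Nat.xor_self, Nat.xor_zero]
          exact pvGood_two_pow j hj10
      have hvv : (i : Int) - (f m).getD 0 = ((i:Int) + 1) - (p : Int) := by
        rw [hv, Option.getD_some, hval]; ring
      rw [hvv]
      exact pvMFold_ge _ _ _ _ (List.mem_range.2 (by omega)) hgood
  · apply pvMFold_le
    · exact pvMFold_init _ _ _ _
    · intro p hp hc
      have hpi : p < i + 1 := List.mem_range.1 hp
      have hdlt : pvM word p ^^^ pvM word (i+1) < 1024 :=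
        Nat.xor_lt_two_pow (n := 10) (hM p (by omega)) (hM (i+1) (le_refl _))
      have hcandm : ∃ cand ∈ pvCand word i, pvM word p = cand := by
        rcases pvGood_small _ hdlt hc with h0 | ⟨j, hj, hje⟩
        · exact ⟨pvM word (i+1), List.mem_cons_self, Nat.xor_eq_zero_iff.1 h0⟩
        · refine ⟨pvM word (i+1) ^^^ (1 <<< j),
            List.mem_cons_of_mem _ (List.mem_map.2 ⟨j, List.mem_range.2 hj, rfl⟩), ?_⟩
          rw [← hje, Nat.xor_comm (pvM word p) (pvM word (i+1)), Nat.xor_xor_cancel_left]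
      obtain ⟨cand, hcand, hpc⟩ := hcandm
      cases hfc : f cand with
      | none => exact absurd hpc (hInv.2 cand hfc p (by omega))
      | some v =>
        obtain ⟨p0, hp0, hp0m, hval, hmin⟩ := hInv.1 cand v hfc
        have hp0p : p0 ≤ p := by
          by_contra hlt
          exact hmin p (by omega) hpc
        have hle : ((i:Int) + 1) - (p : Int) ≤ (i : Int) - (f cand).getD 0 := by
          rw [hfc, Option.getD_some, hval]
          have : (p0 : Int) ≤ (p : Int) := by exact_mod_cast hp0p
          omega
        exact le_trans hle (pvMFold_ge _ _ _ _ hcand (by rw [hfc]; rfl))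

theorem pvBest_succ (word : String) (t : Nat) :
    pvBest word (t+1)
    = pvMFold (fun p => pvGood (pvM word p ^^^ pvM word (t+1)))
        (fun p => (((t:Int) + 1)) - (p : Int)) (List.range (t+1)) (pvBest word t) := by
  unfold pvBest pvMFold
  rw [List.range'_1_concat, List.foldl_append, List.foldl_cons, List.foldl_nil]
  rw [show 1 + t = t + 1 from Nat.add_comm 1 t]
  push_cast
  rfl

theorem pvAGo_eq (word : String) : ∀ (fuel i : Nat) (f : Nat → Option Int) (maxi : Int),
    pvInv word i f → (∀ k < i + fuel, pvDigit word k < 10) → maxi = pvBest word i →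
    pvAGo word fuel i f (pvM word i) maxi = pvBest word (i + fuel) := by
  intro fuel
  induction fuel with
  | zero =>
    intro i f maxi _ _ hmax
    simpa [pvAGo] using hmax
  | succ fuel ih =>
    intro i f maxi hInv hd hmax
    have hstep : pvAGo word (fuel+1) i f (pvM word i) maxi
        = pvAGo word fuel (i+1)
            (match f (pvM word (i+1)) with
             | none => fun x => if x = pvM word (i+1) then some (i : Int) else f x
             | some _ => f)
            (pvM word (i+1))
            ((List.range 10).foldl (fun m j =>
                match f (pvM word (i+1) ^^^ (1 <<< j)) with
                | some p => max m ((i : Int) - p)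
                | none => m)
              (match f (pvM word (i+1)) with
               | some p => max maxi ((i : Int) - p)
               | none => maxi)) := rfl
    rw [hstep]
    have hmaxi2 : ((List.range 10).foldl (fun m j =>
          match f (pvM word (i+1) ^^^ (1 <<< j)) with
          | some p => max m ((i : Int) - p)
          | none => m)
        (match f (pvM word (i+1)) with
         | some p => max maxi ((i : Int) - p)
         | none => maxi)) = pvBest word (i+1) := by
      rw [foldl_match_mfold f ((i : Int)) (fun j => pvM word (i+1) ^^^ (1 <<< j)) (List.range 10)]
      have hcons : pvMFold (fun m => (f m).isSome) (fun m => (i:Int) - (f m).getD 0)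
          (pvCand word i) maxi
          = pvMFold (fun m => (f m).isSome) (fun m => (i:Int) - (f m).getD 0)
            ((List.range 10).map (fun j => pvM word (i+1) ^^^ (1 <<< j)))
            (match f (pvM word (i+1)) with
             | some p => max maxi ((i : Int) - p)
             | none => maxi) := by
        unfold pvCand pvMFold
        rw [List.foldl_cons]
        congr 1
        cases hfc : f (pvM word (i+1)) <;> simp [hfc]
      rw [← hcons,
        step_value word i f maxi hInv
          (fun p hp => pvM_lt word p (fun k hk => hd k (by omega))), hmax,
        ← pvBest_succ word i]
    rw [hmaxi2]
    have harith : i + (fuel + 1) = (i + 1) + fuel := by omega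
    rw [harith]
    exact ih (i+1) _ _ (pvInv_step word i f hInv) (fun k hk => hd k (by omega)) rfl

theorem pvBMasks_eq (word : String) : ∀ (fuel i : Nat),
    pvBMasks word fuel i (pvM word i) = (List.range fuel).map (fun k => pvM word (i+1+k)) := by
  intro fuel
  induction fuel with
  | zero => intro i; rfl
  | succ fuel ih =>
    intro i
    show pvM word (i+1) :: pvBMasks word fuel (i+1) (pvM word (i+1)) = _
    rw [ih (i+1), List.range_succ_eq_map, List.map_cons, List.map_map]
    refine congrArg₂ _ (by norm_num) ?_
    apply List.map_congr_left
    intro k _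
    simp only [Function.comp_apply]
    congr 1
    omega

theorem mapRange_getD (m p : Nat) (f : Nat → Nat) (hp : p < m) :
    ((List.range m).map f).getD p 0 = f p := by
  simp [List.getD_eq_getElem?_getD, hp]

theorem optimized2_alt_eq (n : Int) (word : String) :
    optimized2_alt n word = pvBest word n.toNat := by
  have hmask : (0 :: pvBMasks word n.toNat 0 0) = (List.range (n.toNat+1)).map (pvM word) := by
    have h := pvBMasks_eq word n.toNat 0
    rw [List.range_succ_eq_map, List.map_cons, List.map_map]
    show (0 :: pvBMasks word n.toNat 0 (pvM word 0)) = _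
    rw [h]
    simp only [List.cons.injEq]
    refine ⟨by simp [pvM], ?_⟩
    apply List.map_congr_left
    intro k _
    simp only [Function.comp_apply]
    congr 1
    omega
  show (List.range' 1 ((0 :: pvBMasks word n.toNat 0 0).length - 1)).foldl _ 0 = _
  rw [hmask]
  simp only [List.length_map, List.length_range, Nat.add_sub_cancel]
  unfold pvBest
  apply List.foldl_ext
  intro acc q hq
  have hq' : q < n.toNat + 1 := by
    have := List.mem_range'_1.1 hq
    omega
  apply List.foldl_ext
  intro acc2 p hp
  have hp' : p < q := List.mem_range.1 hp
  rw [mapRange_getD _ p _ (by omega), mapRange_getD _ q _ (by omega)]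

-- ===== VERDICT (by name: the statement is the Claim_ definition above) =====
theorem optimized2_spec : Claim_equal_optimized2 := by
  intro n word _ hpre
  obtain ⟨hlen, hdigb⟩ := hpre
  have hdig : ∀ c ∈ word.toList.take n.toNat, 48 ≤ c.toNat ∧ c.toNat ≤ 57 := by
    intro c hc
    simpa using List.all_eq_true.1 hdigb c hc
  show optimized2 n word = optimized2_alt n word
  have hL : n.toNat ≤ word.toList.length := by omega
  have hd : ∀ k < n.toNat, pvDigit word k < 10 := by
    intro k hk
    have hkl : k < word.toList.length := lt_of_lt_of_le hk hL
    have hmem : word.toList[k] ∈ word.toList.take n.toNat := by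
      apply List.mem_iff_getElem.2
      exact ⟨k, by rw [List.length_take]; exact lt_min hk hkl, by rw [List.getElem_take]⟩
    have hb := hdig _ hmem
    unfold pvDigit
    rw [PySem.Str.pyGet?_natCast, List.getElem?_eq_getElem hkl, Option.getD_some]
    omega
  have hA : optimized2 n word = pvBest word n.toNat := by
    have h := pvAGo_eq word n.toNat 0 (fun m => if m = 0 then some (-1) else none) 0
      (pvInv_init word) (by simpa using hd) rfl
    simpa [pvAGo] using h
  rw [hA, optimized2_alt_eq]
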